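-- pv_equiv track=rewrite | github.com/ivoras/llmtalkie | wikidig_utils.py | remove_nested_curlies
-- ===== SOURCE A (Python) =====
-- def remove_nested_curlies(text: str):
--     # Stack to track open curly braces
--     nesting_level = 0
--     result = []
--     i = 0
--     while i < len(text):
--         if text[i:i+2] == '{{':  # Found an opening tag
--             nesting_level += 1
--             i += 2  # Skip the opening braces
--         elif text[i:i+2] == '}}' and nesting_level > 0:  # Found a closing tag
--             nesting_level -= 1
--             i += 2  # Skip the closing braces
--         else:
--             if nesting_level == 0:  # Only append characters when not inside a tag
--                 result.append(text[i])
--             i += 1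
--     return ''.join(result)
-- ===== SOURCE B (Python) =====
-- def _tokenize(text):
--     # One pre-pass: split text into a stream of literal chunks and '{{'/'}}'
--     # delimiter tokens (same output as re.split(r'(\{\{|\}\})', text)).
--     tokens = []
--     chunk = []
--     i = 0
--     n = len(text)
--     while i < n:
--         pair = text[i:i+2]
--         if pair == '{{' or pair == '}}':
--             tokens.append(''.join(chunk))
--             tokens.append(pair)
--             chunk = []
--             i += 2
--         else:
--             chunk.append(text[i])
--             i += 1
--     tokens.append(''.join(chunk))
--     return tokens
--
-- def remove_nested_curlies(text: str):
--     level = 0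
--     parts = []
--     for tok in _tokenize(text):
--         if tok == '{{':
--             level += 1
--         elif tok == '}}':
--             if level > 0:
--                 level -= 1
--             else:
--                 parts.append(tok)
--         elif level == 0:
--             parts.append(tok)
--     return ''.join(parts)
-- ===== Notes on version B (the rewrite author's own statement) =====
-- stated objective: alternative
-- what changed: Replaces A's index-based character walk (slicing two characters at every position) by a two-phase decomposition: a tokenizer pre-pass splitting the text into literal chunks and open/close curly-delimiter tokens (the output of re.split on the two delimiters), then a single fold over the token stream maintaining the nesting level and emitting whole chunks at level 0.
import Mathlib
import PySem

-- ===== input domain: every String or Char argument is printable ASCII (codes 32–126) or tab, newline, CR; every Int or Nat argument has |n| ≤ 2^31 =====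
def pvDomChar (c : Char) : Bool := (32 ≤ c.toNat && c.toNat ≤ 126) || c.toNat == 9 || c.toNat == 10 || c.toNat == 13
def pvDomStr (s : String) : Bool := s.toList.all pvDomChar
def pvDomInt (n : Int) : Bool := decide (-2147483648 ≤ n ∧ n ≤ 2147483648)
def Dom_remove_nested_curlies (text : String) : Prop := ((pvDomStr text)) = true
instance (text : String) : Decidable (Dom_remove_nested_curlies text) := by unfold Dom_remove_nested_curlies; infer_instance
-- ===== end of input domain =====

-- B tokenizes the text into literal/delimiter tokens in one pre-pass and then folds once
-- over the token stream with a nesting level (alternative decomposition).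


-- ===== PORT A =====
-- A's while loop over index i: 'text[i:i+2] == "{{"' is the test "current char is '{' and
-- the next one too"; consuming the list char by char is the index walk i += 1 / i += 2.
def goA : Nat → List Char → List Char
  | _, [] => []
  | n, c :: rest =>
    if c = '{' ∧ rest.head? = some '{' then goA (n + 1) rest.tail
    else if c = '}' ∧ rest.head? = some '}' ∧ n > 0 then goA (n - 1) rest.tail
    else (if n = 0 then [c] else []) ++ goA n rest
  termination_by _ s => s.length
  decreasing_by all_goals cases rest <;> simp_all

def remove_nested_curlies (text : String) : String := String.ofList (goA 0 text.toList)

-- ===== PORT B =====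
-- tokenizer: exactly Source B's _tokenize scan (the current chunk is built as the recursion returns
-- instead of mutated in place; same chunks, same delimiters, same order).
def splitTok : List Char → List (List Char)
  | [] => [[]]
  | c :: rest =>
    if c = '{' ∧ rest.head? = some '{' then [] :: ['{', '{'] :: splitTok rest.tail
    else if c = '}' ∧ rest.head? = some '}' then [] :: ['}', '}'] :: splitTok rest.tail
    else
      match splitTok rest with
      | chunk :: ts => (c :: chunk) :: ts
      | [] => [[c]]
  termination_by s => s.length
  decreasing_by all_goals cases rest <;> simp_all

-- the fold over tokens with the nesting level (Source B's for loop)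
def goB : Nat → List (List Char) → List Char
  | _, [] => []
  | n, t :: ts =>
    if t = ['{', '{'] then goB (n + 1) ts
    else if t = ['}', '}'] then
      if n > 0 then goB (n - 1) ts else t ++ goB n ts
    else (if n = 0 then t else []) ++ goB n ts

def remove_nested_curlies_alt (text : String) : String :=
  String.ofList (goB 0 (splitTok text.toList))

-- ===== PRECONDITION & SPEC =====
def Spec_remove_nested_curlies (text : String) (out : String) : Prop := out = remove_nested_curlies_alt text
instance (text : String) (out : String) : Decidable (Spec_remove_nested_curlies text out) := by unfold Spec_remove_nested_curlies; infer_instance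

-- ===== CLAIM (what is proved, stated in full; the proofs are below) =====
def Claim_equal_remove_nested_curlies : Prop := ∀ (text : String), Dom_remove_nested_curlies text → Spec_remove_nested_curlies text (remove_nested_curlies text)

-- ===== LEMMAS AND PROOFS =====

theorem splitTok_ne_nil (s : List Char) : splitTok s ≠ [] := by
  cases s with
  | nil => simp [splitTok]
  | cons c rest =>
    rw [splitTok]
    split_ifs
    · simp
    · simp
    · cases hs : splitTok rest <;> simp

-- the first chunk of splitTok s, when nonempty, starts with s's first character
theorem splitTok_head (s : List Char) (chunk : List Char) (ts : List (List Char))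
    (h : splitTok s = chunk :: ts) (hne : chunk ≠ []) : chunk.head? = s.head? := by
  cases s with
  | nil => simp [splitTok] at h; simp [h] at hne
  | cons c rest =>
    rw [splitTok] at h
    split_ifs at h with h1 h2
    · simp at h; simp [h.1] at hne
    · simp at h; simp [h.1] at hne
    · cases hs : splitTok rest with
      | nil => rw [hs] at h; simp at h; simp [← h.1]
      | cons chunk' ts' => rw [hs] at h; simp at h; simp [← h.1]

-- literal chunks are never a delimiter token
theorem splitTok_not_delim (s : List Char) (chunk : List Char) (ts : List (List Char))
    (h : splitTok s = chunk :: ts) : chunk ≠ ['{', '{'] ∧ chunk ≠ ['}', '}'] := by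
  cases s with
  | nil => simp [splitTok] at h; simp [h]
  | cons c rest =>
    rw [splitTok] at h
    split_ifs at h with h1 h2
    · simp at h; simp [h.1]
    · simp at h; simp [h.1]
    · cases hs : splitTok rest with
      | nil => rw [hs] at h; simp at h; simp [← h.1]
      | cons chunk' ts' =>
        rw [hs] at h
        simp at h
        rw [← h.1]
        constructor <;> intro hc
        · have hc1 : c = '{' := by injection hc
          have hch : chunk' = ['{'] := by injection hc
          have hh := splitTok_head rest chunk' ts' hs (by simp [hch])
          rw [hch] at hh
          exact h1 ⟨hc1, hh.symm⟩
        · have hc1 : c = '}' := by injection hc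
          have hch : chunk' = ['}'] := by injection hc
          have hh := splitTok_head rest chunk' ts' hs (by simp [hch])
          rw [hch] at hh
          exact h2 ⟨hc1, hh.symm⟩

theorem goB_nil_tok (n : Nat) (ts : List (List Char)) : goB n ([] :: ts) = goB n ts := by
  simp [goB]

theorem goB_open (n : Nat) (ts : List (List Char)) : goB n (['{', '{'] :: ts) = goB (n + 1) ts := by
  simp [goB]

theorem goB_close_pos (n : Nat) (ts : List (List Char)) (h : n > 0) :
    goB n (['}', '}'] :: ts) = goB (n - 1) ts := by
  simp [goB, h]

theorem goB_close_zero (ts : List (List Char)) :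
    goB 0 (['}', '}'] :: ts) = '}' :: '}' :: goB 0 ts := by
  simp [goB]

theorem goB_lit (n : Nat) (t : List Char) (ts : List (List Char))
    (h1 : t ≠ ['{', '{']) (h2 : t ≠ ['}', '}']) :
    goB n (t :: ts) = (if n = 0 then t else []) ++ goB n ts := by
  rw [goB, if_neg h1, if_neg h2]

theorem goA_cons (n : Nat) (c : Char) (rest : List Char)
    (h1 : ¬(c = '{' ∧ rest.head? = some '{'))
    (h2 : ¬(c = '}' ∧ rest.head? = some '}' ∧ n > 0)) :
    goA n (c :: rest) = (if n = 0 then [c] else []) ++ goA n rest := by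
  rw [goA, if_neg h1, if_neg h2]

theorem key (s : List Char) (n : Nat) : goB n (splitTok s) = goA n s := by
  cases s with
  | nil => simp [splitTok, goB, goA]
  | cons c rest =>
    by_cases h1 : c = '{' ∧ rest.head? = some '{'
    · -- opening delimiter
      rw [splitTok, if_pos h1, goA, if_pos h1, goB_nil_tok, goB_open]
      exact key rest.tail (n + 1)
    · by_cases h2 : c = '}' ∧ rest.head? = some '}'
      · rw [splitTok, if_neg h1, if_pos h2]
        obtain ⟨hc, hr⟩ := h2
        subst hc
        rcases rest with _ | ⟨c2, rest2⟩
        · simp at hr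
        · simp at hr
          subst hr
          by_cases hn : n > 0
          · -- closing delimiter with positive nesting level
            rw [goA, if_neg h1, if_pos ⟨rfl, by simp, hn⟩]
            rw [goB_nil_tok, goB_close_pos n _ hn]
            exact key rest2 (n - 1)
          · -- '}}' at level 0: B emits the token; A emits the two chars one at a time
            have hn0 : n = 0 := by omega
            subst hn0
            rw [goA, if_neg h1, if_neg (by simp)]
            rw [goA_cons 0 '}' rest2 (by simp) (by simp)]
            rw [goB_nil_tok, goB_close_zero]
            simpa using key rest2 0
      · -- literal character
        rw [splitTok, if_neg h1, if_neg h2, goA, if_neg h1,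
            if_neg (fun h => h2 ⟨h.1, h.2.1⟩)]
        cases hs : splitTok rest with
        | nil => exact absurd hs (splitTok_ne_nil rest)
        | cons chunk ts =>
          have hm : (match chunk :: ts with
              | chunk :: ts => (c :: chunk) :: ts
              | [] => [[c]]) = (c :: chunk) :: ts := rfl
          rw [hm]
          have hnd := splitTok_not_delim rest chunk ts hs
          have hcnd : (c :: chunk) ≠ ['{', '{'] ∧ (c :: chunk) ≠ ['}', '}'] := by
            constructor <;> intro hc
            · have hc1 : c = '{' := by injection hc
              have hch : chunk = ['{'] := by injection hc
              have hh := splitTok_head rest chunk ts hs (by simp [hch])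
              rw [hch] at hh
              exact h1 ⟨hc1, hh.symm⟩
            · have hc1 : c = '}' := by injection hc
              have hch : chunk = ['}'] := by injection hc
              have hh := splitTok_head rest chunk ts hs (by simp [hch])
              rw [hch] at hh
              exact h2 ⟨hc1, hh.symm⟩
          have ih := key rest n
          rw [hs] at ih
          rw [goB_lit n _ ts hcnd.1 hcnd.2]
          rw [goB_lit n chunk ts hnd.1 hnd.2] at ih
          rw [← ih]
          by_cases hn : n = 0 <;> simp [hn]
  termination_by s.length
  decreasing_by all_goals cases rest <;> simp_all

-- ===== VERDICT (by name: the statement is the Claim_ definition above) =====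
theorem remove_nested_curlies_spec : Claim_equal_remove_nested_curlies := by
  intro text _
  unfold Spec_remove_nested_curlies remove_nested_curlies remove_nested_curlies_alt
  rw [key]
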